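-- pv_equiv track=rewrite | github.com/IES-Rafael-Alberti/dawb1-2425-ejercicios-u2-Lmrocio | src/Prueba_en_grupos.py | hacer_fila_1
-- ===== SOURCE A (Python) =====
-- def hacer_fila_1(i:int) -> str:
--     fila = ""
--     final = i + 1
--     suma = 0
--     for i in range(0, final, 1):
--         fila += str(i)
--         suma += i
--         if i < final-1:
--             fila += " + "
--         if i == final-1:
--             fila += " = "
--     fila += str(suma)
--
--     return fila
-- ===== SOURCE B (Python) =====
-- def hacer_fila_1(i: int) -> str:
--     total = 0 if i < 0 else (i + 1) * i // 2
--     terms = " + ".join(str(k) for k in range(i + 1))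
--     if not terms:
--         return str(total)
--     return terms + " = " + str(total)
-- ===== Notes on version B (the rewrite author's own statement) =====
-- stated objective: simpler
-- what changed: Replaces the incremental loop with string concatenation and a running sum by a closed-form Gauss sum and a single ' + '.join over range(i+1), appending ' = total' only when there is at least one term.
import Mathlib
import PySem

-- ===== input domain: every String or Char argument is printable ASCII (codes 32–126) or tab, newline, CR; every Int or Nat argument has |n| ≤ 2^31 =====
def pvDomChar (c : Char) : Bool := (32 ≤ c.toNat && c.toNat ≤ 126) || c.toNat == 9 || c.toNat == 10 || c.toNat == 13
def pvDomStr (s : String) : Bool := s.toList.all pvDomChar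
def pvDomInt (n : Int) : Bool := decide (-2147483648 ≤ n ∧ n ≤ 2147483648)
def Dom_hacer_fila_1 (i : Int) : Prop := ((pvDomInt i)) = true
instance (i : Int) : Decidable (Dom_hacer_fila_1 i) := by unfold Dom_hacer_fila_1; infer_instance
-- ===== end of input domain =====

-- B replaces A's incremental loop (string concatenation + running sum) by a closed-form
-- Gauss sum and a single " + ".join over range(i+1); objective: simpler.

-- ===== PORT A =====
def hacer_fila_1 (i : Int) : String :=
  let final := i + 1
  let st := (PySem.List.pyRange 0 final 1).foldl
    (fun (st : String × Int) j =>
      let fila := st.1 ++ PySem.Int.toStr j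
      let suma := st.2 + j
      let fila := if j < final - 1 then fila ++ " + " else fila
      let fila := if j == final - 1 then fila ++ " = " else fila
      (fila, suma)) ("", 0)
  st.1 ++ PySem.Int.toStr st.2

-- ===== PORT B =====
def hacer_fila_1_alt (i : Int) : String :=
  let total : Int := if i < 0 then 0 else PySem.Int.floordiv ((i + 1) * i) 2
  let terms := (PySem.List.pyRange 0 (i + 1) 1).map PySem.Int.toStr
  if terms.isEmpty then PySem.Int.toStr total
  else PySem.Str.join " + " terms ++ " = " ++ PySem.Int.toStr total

-- ===== PRECONDITION & SPEC =====
def Spec_hacer_fila_1 (i : Int) (out : String) : Prop := out = hacer_fila_1_alt i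
instance (i : Int) (out : String) : Decidable (Spec_hacer_fila_1 i out) := by unfold Spec_hacer_fila_1; infer_instance

-- ===== CLAIM (what is proved, stated in full; the proofs are below) =====
def Claim_equal_hacer_fila_1 : Prop := ∀ (i : Int), Dom_hacer_fila_1 i → Spec_hacer_fila_1 i (hacer_fila_1 i)

-- ===== LEMMAS AND PROOFS =====

-- The loop body of A restricted to the non-final iterations: append "k + " and add k.
def pvAux (l : List Int) : String × Int :=
  l.foldl (fun st j => (st.1 ++ PySem.Int.toStr j ++ " + ", st.2 + j)) ("", 0)

theorem pvAux_snoc (xs : List Int) (a : Int) :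
    pvAux (xs ++ [a]) = ((pvAux xs).1 ++ PySem.Int.toStr a ++ " + ", (pvAux xs).2 + a) := by
  simp [pvAux, List.foldl_append]

-- A's fold with final = n+1 splits into pvAux on [0..n-1] and the special last step at n.
theorem hacer_fila_1_split (n : ℕ) :
    hacer_fila_1 (n : Int) =
      (pvAux (PySem.List.pyRange 0 (n : Int) 1)).1 ++ PySem.Int.toStr (n : Int) ++ " = "
        ++ PySem.Int.toStr ((pvAux (PySem.List.pyRange 0 (n : Int) 1)).2 + (n : Int)) := by
  have hsplit : PySem.List.pyRange 0 ((n : Int) + 1) 1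
      = PySem.List.pyRange 0 (n : Int) 1 ++ [(n : Int)] :=
    PySem.List.pyRange_one_succ_right (by positivity)
  have hcongr :
      (PySem.List.pyRange 0 (n : Int) 1).foldl
        (fun (st : String × Int) j =>
          let fila := st.1 ++ PySem.Int.toStr j
          let suma := st.2 + j
          let fila := if j < (n : Int) + 1 - 1 then fila ++ " + " else fila
          let fila := if j == (n : Int) + 1 - 1 then fila ++ " = " else fila
          (fila, suma)) ("", 0)
      = pvAux (PySem.List.pyRange 0 (n : Int) 1) := by
    apply PySem.List.foldl_congr_mem
    intro acc x hx
    have hxr := (PySem.List.mem_pyRange_one).mp hx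
    have h1 : x < (n : Int) := by omega
    have h2 : ¬ x = (n : Int) := by omega
    simp [h1, h2]
  simp only [hacer_fila_1, hsplit, List.foldl_append, hcongr]
  simp [String.append_assoc]

-- " + ".join of a nonempty list grows at the back by " + " ++ last element.
theorem pvJoin_snoc (xs : List String) (a : String) (h : xs ≠ []) :
    PySem.Str.join " + " (xs ++ [a]) = PySem.Str.join " + " xs ++ " + " ++ a := by
  induction xs with
  | nil => exact absurd rfl h
  | cons x ys ih =>
      cases ys with
      | nil =>
          apply String.toList_inj.mp
          simp [PySem.Str.toList_join, PySem.Chars.join_cons_cons, PySem.Chars.join_singleton]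
      | cons y zs =>
          apply String.toList_inj.mp
          have := congrArg String.toList (ih (by simp))
          simp [PySem.Str.toList_join, PySem.Chars.join_cons_cons] at this ⊢
          simp [this]

-- The " + "-joined terms equal pvAux's prefix string followed by the last term.
theorem pvJoin_eq (n : ℕ) :
    (pvAux (PySem.List.pyRange 0 (n : Int) 1)).1 ++ PySem.Int.toStr (n : Int)
      = PySem.Str.join " + " ((PySem.List.pyRange 0 ((n : Int) + 1) 1).map PySem.Int.toStr) := by
  induction n with
  | zero =>
      apply String.toList_inj.mp
      norm_num [show PySem.List.pyRange 0 0 1 = [] from by decide,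
        show PySem.List.pyRange 0 1 1 = [(0 : Int)] from by decide,
        pvAux, PySem.Str.toList_join, PySem.Chars.join_singleton]
  | succ n ih =>
      have hsplit : PySem.List.pyRange 0 ((n : Int) + 1) 1
          = PySem.List.pyRange 0 (n : Int) 1 ++ [(n : Int)] :=
        PySem.List.pyRange_one_succ_right (by positivity)
      have hsplit2 : PySem.List.pyRange 0 ((n : Int) + 1 + 1) 1
          = PySem.List.pyRange 0 ((n : Int) + 1) 1 ++ [(n : Int) + 1] :=
        PySem.List.pyRange_one_succ_right (by positivity)
      have hcons : PySem.List.pyRange 0 ((n : Int) + 1) 1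
          = 0 :: PySem.List.pyRange 1 ((n : Int) + 1) 1 :=
        PySem.List.pyRange_one_cons (by omega)
      have hne : List.map PySem.Int.toStr (PySem.List.pyRange 0 ((n : Int) + 1) 1) ≠ [] := by
        simp [hcons]
      push_cast
      rw [hsplit2, List.map_append,
        show List.map PySem.Int.toStr [(n : Int) + 1] = [PySem.Int.toStr ((n : Int) + 1)] from rfl,
        pvJoin_snoc _ _ hne, ← ih, hsplit, pvAux_snoc]

theorem pvSum_eq (n : ℕ) :
    2 * (pvAux (PySem.List.pyRange 0 (n : Int) 1)).2 = (n : Int) * ((n : Int) - 1) := by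
  induction n with
  | zero => rw [PySem.List.pyRange_one_eq_nil (by omega)]; simp [pvAux]
  | succ n ih =>
      have hsplit : PySem.List.pyRange 0 ((n : Int) + 1) 1
          = PySem.List.pyRange 0 (n : Int) 1 ++ [(n : Int)] :=
        PySem.List.pyRange_one_succ_right (by positivity)
      push_cast
      rw [hsplit, pvAux_snoc]
      push_cast at ih
      ring_nf at ih ⊢
      linarith [ih]

theorem pvTotal_eq (n : ℕ) :
    PySem.Int.floordiv (((n : Int) + 1) * (n : Int)) 2
      = (pvAux (PySem.List.pyRange 0 (n : Int) 1)).2 + (n : Int) := by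
  have h : ((n : Int) + 1) * (n : Int)
      = 2 * ((pvAux (PySem.List.pyRange 0 (n : Int) 1)).2 + (n : Int)) := by
    have h2 := pvSum_eq n
    ring_nf at h2 ⊢
    linarith [h2]
  rw [PySem.Int.floordiv_eq_ediv_of_pos (by omega), h, Int.mul_ediv_cancel_left _ (by omega)]

-- ===== VERDICT (by name: the statement is the Claim_ definition above) =====
theorem hacer_fila_1_spec : Claim_equal_hacer_fila_1 := by
  intro i _
  unfold Spec_hacer_fila_1
  by_cases h : i < 0
  · have hnil : PySem.List.pyRange 0 (i + 1) 1 = [] :=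
      PySem.List.pyRange_one_eq_nil (by omega)
    simp [hacer_fila_1, hacer_fila_1_alt, hnil, h]
  · obtain ⟨n, rfl⟩ : ∃ n : ℕ, i = (n : Int) :=
      ⟨i.toNat, (Int.toNat_of_nonneg (by omega)).symm⟩
    have hne : PySem.List.pyRange 0 ((n : Int) + 1) 1 ≠ [] := by
      rw [PySem.List.pyRange_one_cons (by omega)]; simp
    have hprop : ¬ ((List.map PySem.Int.toStr (PySem.List.pyRange 0 ((n : Int) + 1) 1)).isEmpty = true) := by
      simp [hne]
    rw [hacer_fila_1_split]
    simp only [hacer_fila_1_alt, if_neg h, if_neg hprop]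
    rw [← pvJoin_eq, pvTotal_eq]
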